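-- pv_equiv track=rewrite | github.com/SachaYT1/repetitor | умскул 2 часть/27.py | count_pairs_efficient
-- ===== SOURCE A (Python) =====
-- def count_pairs_efficient(numbers):
--     k21 = k3 = k7 = k = 0
--
--     for num in numbers:
--         if num % 3 == 0 and num % 7 == 0:
--             k21 += 1
--         elif num % 7 == 0:
--             k7 += 1
--         elif num % 3 == 0:
--             k3 += 1
--         else:
--             k += 1
--
--     countPairs = k3 * k + k3 * (k3 - 1) // 2 + k7 * k + k7 * (k7 - 1) // 2
--     return countPairs
-- ===== SOURCE B (Python) =====
-- def count_pairs_efficient(numbers):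
--     # Brute-force pair enumeration: a pair is counted exactly when the product
--     # of its two elements is divisible by exactly one of 3 and 7.
--     total = 0
--     seen = []
--     for num in numbers:
--         for prev in seen:
--             p = prev * num
--             if (p % 3 == 0) != (p % 7 == 0):
--                 total += 1
--         seen.append(num)
--     return total
-- ===== Notes on version B (the rewrite author's own statement) =====
-- stated objective: alternative
-- what changed: Replaced the bucket-counting pass plus combinatorial closed form by direct brute-force enumeration of all pairs, counting a pair exactly when the product of its two elements is divisible by exactly one of 3 and 7.
import Mathlib
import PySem

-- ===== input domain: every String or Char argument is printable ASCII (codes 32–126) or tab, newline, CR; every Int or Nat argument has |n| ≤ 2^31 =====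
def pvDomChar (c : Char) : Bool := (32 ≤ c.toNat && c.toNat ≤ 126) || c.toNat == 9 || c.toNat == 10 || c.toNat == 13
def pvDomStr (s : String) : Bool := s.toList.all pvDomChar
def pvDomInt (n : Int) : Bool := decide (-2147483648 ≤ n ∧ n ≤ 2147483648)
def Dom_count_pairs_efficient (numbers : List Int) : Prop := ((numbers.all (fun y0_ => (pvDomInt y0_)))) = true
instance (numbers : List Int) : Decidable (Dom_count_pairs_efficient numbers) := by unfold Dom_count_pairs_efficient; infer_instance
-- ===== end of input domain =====

-- B replaces A's bucket counts + closed-form formula by direct brute-force enumeration of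
-- all pairs, counting a pair iff its product is divisible by exactly one of 3 and 7
-- (objective: alternative algorithm; B is quadratic, not faster).

-- ===== PORT A =====
-- state (k21, k3, k7, k), exactly A's if/elif chain
def count_pairs_efficient (numbers : List Int) : Int :=
  let s := numbers.foldl (fun (s : Int × Int × Int × Int) num =>
    if PySem.Int.mod num 3 = 0 ∧ PySem.Int.mod num 7 = 0 then
      (s.1 + 1, s.2.1, s.2.2.1, s.2.2.2)
    else if PySem.Int.mod num 7 = 0 then
      (s.1, s.2.1, s.2.2.1 + 1, s.2.2.2)
    else if PySem.Int.mod num 3 = 0 then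
      (s.1, s.2.1 + 1, s.2.2.1, s.2.2.2)
    else
      (s.1, s.2.1, s.2.2.1, s.2.2.2 + 1)) (0, 0, 0, 0)
  s.2.1 * s.2.2.2 + PySem.Int.floordiv (s.2.1 * (s.2.1 - 1)) 2
    + s.2.2.1 * s.2.2.2 + PySem.Int.floordiv (s.2.2.1 * (s.2.2.1 - 1)) 2

-- ===== PORT B =====
-- the pair test: product divisible by exactly one of 3 and 7
def pvPairTest (prev num : Int) : Bool :=
  (PySem.Int.mod (prev * num) 3 == 0) != (PySem.Int.mod (prev * num) 7 == 0)

-- state (seen, total): for each num, scan the already-seen prefix, then append num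
def count_pairs_efficient_alt (numbers : List Int) : Int :=
  let s := numbers.foldl (fun (s : List Int × Int) num =>
    (s.1 ++ [num],
     s.1.foldl (fun t prev => if pvPairTest prev num then t + 1 else t) s.2)) ([], 0)
  s.2

-- ===== PRECONDITION & SPEC =====
def Spec_count_pairs_efficient (numbers : List Int) (out : Int) : Prop := out = count_pairs_efficient_alt numbers
instance (numbers : List Int) (out : Int) : Decidable (Spec_count_pairs_efficient numbers out) := by unfold Spec_count_pairs_efficient; infer_instance

-- ===== CLAIM =====
def Claim_equal_count_pairs_efficient : Prop := ∀ (numbers : List Int), Dom_count_pairs_efficient numbers → Spec_count_pairs_efficient numbers (count_pairs_efficient numbers)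

-- ===== LEMMAS AND PROOFS =====

-- Int-valued count of elements satisfying a decidable predicate
def pvCnt (p : Int → Prop) [DecidablePred p] : List Int → Int
  | [] => 0
  | x :: xs => (if p x then 1 else 0) + pvCnt p xs

-- the four disjoint branch predicates of A's chain
abbrev pvP21 (n : Int) : Prop := PySem.Int.mod n 3 = 0 ∧ PySem.Int.mod n 7 = 0
abbrev pvP7 (n : Int) : Prop := ¬ pvP21 n ∧ PySem.Int.mod n 7 = 0
abbrev pvP3 (n : Int) : Prop := ¬ pvP21 n ∧ ¬ PySem.Int.mod n 7 = 0 ∧ PySem.Int.mod n 3 = 0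
abbrev pvPR (n : Int) : Prop := ¬ pvP21 n ∧ ¬ PySem.Int.mod n 7 = 0 ∧ ¬ PySem.Int.mod n 3 = 0

lemma foldA_eq (l : List Int) : ∀ (a b c d : Int),
    l.foldl (fun (s : Int × Int × Int × Int) num =>
      if PySem.Int.mod num 3 = 0 ∧ PySem.Int.mod num 7 = 0 then
        (s.1 + 1, s.2.1, s.2.2.1, s.2.2.2)
      else if PySem.Int.mod num 7 = 0 then
        (s.1, s.2.1, s.2.2.1 + 1, s.2.2.2)
      else if PySem.Int.mod num 3 = 0 then
        (s.1, s.2.1 + 1, s.2.2.1, s.2.2.2)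
      else
        (s.1, s.2.1, s.2.2.1, s.2.2.2 + 1)) (a, b, c, d)
    = (a + pvCnt pvP21 l, b + pvCnt pvP3 l, c + pvCnt pvP7 l, d + pvCnt pvPR l) := by
  induction l with
  | nil => intro a b c d; simp [pvCnt]
  | cons x xs ih =>
    intro a b c d
    rw [List.foldl_cons]
    by_cases h3 : PySem.Int.mod x 3 = 0
    · by_cases h7 : PySem.Int.mod x 7 = 0
      · have hp21 : pvP21 x := ⟨h3, h7⟩
        have hn3 : ¬ pvP3 x := fun h => h.1 hp21
        have hn7 : ¬ pvP7 x := fun h => h.1 hp21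
        have hnr : ¬ pvPR x := fun h => h.1 hp21
        rw [if_pos (⟨h3, h7⟩ : PySem.Int.mod x 3 = 0 ∧ PySem.Int.mod x 7 = 0), ih]
        simp only [pvCnt, hp21, hn3, hn7, hnr, ite_true, ite_false, Prod.mk.injEq]
        refine ⟨by omega, by omega, by omega, by omega⟩
      · have hn21 : ¬ (PySem.Int.mod x 3 = 0 ∧ PySem.Int.mod x 7 = 0) := fun h => h7 h.2
        have hp3 : pvP3 x := ⟨hn21, h7, h3⟩
        have hn21' : ¬ pvP21 x := hn21
        have hn7 : ¬ pvP7 x := fun h => h7 h.2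
        have hnr : ¬ pvPR x := fun h => h.2.2 h3
        rw [if_neg hn21, if_neg h7, if_pos h3, ih]
        simp only [pvCnt, hn21', hp3, hn7, hnr, ite_true, ite_false, Prod.mk.injEq]
        refine ⟨by omega, by omega, by omega, by omega⟩
    · by_cases h7 : PySem.Int.mod x 7 = 0
      · have hn21 : ¬ (PySem.Int.mod x 3 = 0 ∧ PySem.Int.mod x 7 = 0) := fun h => h3 h.1
        have hn21' : ¬ pvP21 x := hn21
        have hp7 : pvP7 x := ⟨hn21, h7⟩
        have hn3 : ¬ pvP3 x := fun h => h3 h.2.2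
        have hnr : ¬ pvPR x := fun h => h.2.1 h7
        rw [if_neg hn21, if_pos h7, ih]
        simp only [pvCnt, hn21', hp7, hn3, hnr, ite_true, ite_false, Prod.mk.injEq]
        refine ⟨by omega, by omega, by omega, by omega⟩
      · have hn21 : ¬ (PySem.Int.mod x 3 = 0 ∧ PySem.Int.mod x 7 = 0) := fun h => h3 h.1
        have hn21' : ¬ pvP21 x := hn21
        have hn3 : ¬ pvP3 x := fun h => h3 h.2.2
        have hn7 : ¬ pvP7 x := fun h => h7 h.2
        have hpr : pvPR x := ⟨hn21, h7, h3⟩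
        rw [if_neg hn21, if_neg h7, if_neg h3, ih]
        simp only [pvCnt, hn21', hn3, hn7, hpr, ite_true, ite_false, Prod.mk.injEq]
        refine ⟨by omega, by omega, by omega, by omega⟩

-- number of later partners counted for x against the elements of l
def pvRow (x : Int) : List Int → Int
  | [] => 0
  | b :: bs => (if pvPairTest x b then 1 else 0) + pvRow x bs

-- Σ_{a∈s, b∈l} of the pair test (a from the seen prefix, b from the remainder)
def pvCross (s l : List Int) : Int :=
  match s with
  | [] => 0
  | a :: as_ => pvRow a l + pvCross as_ l

-- internal pair count of l (what B computes starting from an empty prefix)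
def pvQ : List Int → Int
  | [] => 0
  | x :: xs => pvRow x xs + pvQ xs

lemma inner_fold_eq (x : Int) (s : List Int) : ∀ (t : Int),
    s.foldl (fun t prev => if pvPairTest prev x then t + 1 else t) t = t + pvCross s [x] := by
  induction s with
  | nil => intro t; simp [pvCross]
  | cons a as_ ih =>
    intro t
    rw [List.foldl_cons, ih]
    simp only [pvCross, pvRow]
    split_ifs <;> omega

lemma pvCross_cons_right (s : List Int) (x : Int) (l : List Int) :
    pvCross s (x :: l) = pvCross s [x] + pvCross s l := by
  induction s with
  | nil => simp [pvCross]
  | cons a as_ ih =>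
    simp only [pvCross, pvRow, ih]
    omega

lemma pvCross_append_left (s : List Int) (x : Int) (l : List Int) :
    pvCross (s ++ [x]) l = pvCross s l + pvRow x l := by
  induction s with
  | nil => simp [pvCross]
  | cons a as_ ih =>
    simp only [List.cons_append, pvCross, ih]
    omega

lemma pvCross_nil (s : List Int) : pvCross s [] = 0 := by
  induction s with
  | nil => rfl
  | cons a as_ ih => simp [pvCross, pvRow, ih]

lemma foldB_eq (l : List Int) : ∀ (s : List Int) (t : Int),
    l.foldl (fun (st : List Int × Int) num =>
      (st.1 ++ [num],
       st.1.foldl (fun t prev => if pvPairTest prev num then t + 1 else t) st.2)) (s, t)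
    = (s ++ l, t + pvCross s l + pvQ l) := by
  induction l with
  | nil => intro s t; simp [pvCross_nil, pvQ]
  | cons x xs ih =>
    intro s t
    have h1 := pvCross_cons_right s x xs
    rw [List.foldl_cons]
    simp only
    rw [inner_fold_eq, ih, pvCross_append_left]
    simp only [pvQ, Prod.mk.injEq]
    exact ⟨by simp, by omega⟩

-- divisibility bridge for the branch predicates
lemma mod3_dvd (n : Int) : PySem.Int.mod n 3 = 0 ↔ (3 : Int) ∣ n := by
  rw [PySem.Int.mod_eq_zero_iff_dvd] <;> omega

lemma mod7_dvd (n : Int) : PySem.Int.mod n 7 = 0 ↔ (7 : Int) ∣ n := by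
  rw [PySem.Int.mod_eq_zero_iff_dvd] <;> omega

-- the pair test as a decide over the two elements' categories (3 and 7 are prime)
lemma pairTest_decide (a b : Int) :
    pvPairTest a b
      = decide ((((3:Int) ∣ a ∨ (3:Int) ∣ b)) ↔ ¬ ((7:Int) ∣ a ∨ (7:Int) ∣ b)) := by
  have p3 : Prime (3:ℤ) := Int.prime_three
  have p7 : Prime (7:ℤ) := by rw [Int.prime_iff_natAbs_prime]; norm_num
  have h3 : PySem.Int.mod (a*b) 3 = 0 ↔ ((3:Int) ∣ a ∨ (3:Int) ∣ b) := by
    rw [mod3_dvd]; exact Prime.dvd_mul p3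
  have h7 : PySem.Int.mod (a*b) 7 = 0 ↔ ((7:Int) ∣ a ∨ (7:Int) ∣ b) := by
    rw [mod7_dvd]; exact Prime.dvd_mul p7
  unfold pvPairTest
  by_cases c3 : (3:Int) ∣ a ∨ (3:Int) ∣ b <;> by_cases c7 : (7:Int) ∣ a ∨ (7:Int) ∣ b
  · rw [h3.mpr c3, h7.mpr c7]; simp [c3, c7]
  · have e7 : (PySem.Int.mod (a*b) 7 == 0) = false := by
      simp only [beq_eq_false_iff_ne, ne_eq]; exact fun h => c7 (h7.mp h)
    rw [h3.mpr c3, e7]; simp [c3, c7]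
  · have e3 : (PySem.Int.mod (a*b) 3 == 0) = false := by
      simp only [beq_eq_false_iff_ne, ne_eq]; exact fun h => c3 (h3.mp h)
    rw [e3, h7.mpr c7]; simp [c3, c7]
  · have e3 : (PySem.Int.mod (a*b) 3 == 0) = false := by
      simp only [beq_eq_false_iff_ne, ne_eq]; exact fun h => c3 (h3.mp h)
    have e7 : (PySem.Int.mod (a*b) 7 == 0) = false := by
      simp only [beq_eq_false_iff_ne, ne_eq]; exact fun h => c7 (h7.mp h)
    rw [e3, e7]; simp [c3, c7]

-- pvRow of x over l, by x's category
lemma pvRow_eq (x : Int) (l : List Int) :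
    pvRow x l =
      if pvP21 x then 0
      else if pvP7 x then pvCnt pvP7 l + pvCnt pvPR l
      else if pvP3 x then pvCnt pvP3 l + pvCnt pvPR l
      else pvCnt pvP3 l + pvCnt pvP7 l := by
  induction l with
  | nil => simp only [pvRow, pvCnt]; split_ifs <;> simp
  | cons b bs ih =>
    simp only [pvRow, pvCnt, ih, pairTest_decide]
    by_cases x3 : (3:Int) ∣ x <;> by_cases x7 : (7:Int) ∣ x <;>
      by_cases b3 : (3:Int) ∣ b <;> by_cases b7 : (7:Int) ∣ b <;>
      simp only [pvP21, pvP3, pvP7, pvPR, mod3_dvd, mod7_dvd, x3, x7, b3, b7] <;>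
      simp <;> omega

-- arithmetic steps for the four categories (Int ediv; k*(k-1) is even)
lemma pv_even (k : Int) : (2:Int) ∣ k * (k - 1) := by
  rcases Int.even_or_odd k with he | ho
  · exact Dvd.dvd.mul_right he.two_dvd _
  · exact Dvd.dvd.mul_left (Int.even_sub_one.mpr (Int.not_even_iff_odd.mpr ho)).two_dvd _

lemma pv_step3 (a c r : Int) :
    a + r + (a * r + (a*(a-1))/2 + c * r + (c*(c-1))/2)
      = (a+1) * r + ((a+1)*(a+1-1))/2 + c * r + (c*(c-1))/2 := by
  have h1 : (a+1)*(a+1-1) = a*(a-1) + 2*a := by ring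
  have h2 : (a+1)*r = a*r + r := by ring
  have he := pv_even a
  rw [h1, h2]; omega

lemma pv_step7 (a c r : Int) :
    c + r + (a * r + (a*(a-1))/2 + c * r + (c*(c-1))/2)
      = a * r + (a*(a-1))/2 + (c+1) * r + ((c+1)*(c+1-1))/2 := by
  have h1 : (c+1)*(c+1-1) = c*(c-1) + 2*c := by ring
  have h2 : (c+1)*r = c*r + r := by ring
  have he := pv_even c
  rw [h1, h2]; omega

lemma pv_stepR (a c r : Int) :
    a + c + (a * r + (a*(a-1))/2 + c * r + (c*(c-1))/2)
      = a * (r+1) + (a*(a-1))/2 + c * (r+1) + (c*(c-1))/2 := by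
  have h1 : a*(r+1) = a*r + a := by ring
  have h2 : c*(r+1) = c*r + c := by ring
  rw [h1, h2]; omega

-- internal pair count = A's closed form over the bucket counts
lemma pvQ_eq (l : List Int) :
    pvQ l = pvCnt pvP3 l * pvCnt pvPR l + PySem.Int.floordiv (pvCnt pvP3 l * (pvCnt pvP3 l - 1)) 2
      + pvCnt pvP7 l * pvCnt pvPR l + PySem.Int.floordiv (pvCnt pvP7 l * (pvCnt pvP7 l - 1)) 2 := by
  have hf : ∀ z : Int, PySem.Int.floordiv z 2 = z / 2 :=
    fun z => PySem.Int.floordiv_eq_ediv_of_pos (by norm_num)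
  induction l with
  | nil => simp [pvQ, pvCnt, PySem.Int.floordiv]
  | cons x xs ih =>
    by_cases h21 : pvP21 x
    · have hn7 : ¬ pvP7 x := fun h => h.1 h21
      have hn3 : ¬ pvP3 x := fun h => h.1 h21
      have hnr : ¬ pvPR x := fun h => h.1 h21
      have hrow : pvRow x xs = 0 := by rw [pvRow_eq, if_pos h21]
      simp only [pvQ, pvCnt, hrow, ih, if_pos h21, if_neg hn7, if_neg hn3, if_neg hnr, zero_add]
    · by_cases h7 : pvP7 x
      · have hn3 : ¬ pvP3 x := fun h => h.2.1 h7.2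
        have hnr : ¬ pvPR x := fun h => h.2.1 h7.2
        have hrow : pvRow x xs = pvCnt pvP7 xs + pvCnt pvPR xs := by
          rw [pvRow_eq, if_neg h21, if_pos h7]
        have hc7 : pvCnt pvP7 (x :: xs) = pvCnt pvP7 xs + 1 := by
          simp only [pvCnt, if_pos h7]; omega
        have hc3 : pvCnt pvP3 (x :: xs) = pvCnt pvP3 xs := by
          simp only [pvCnt, if_neg hn3]; omega
        have hcr : pvCnt pvPR (x :: xs) = pvCnt pvPR xs := by
          simp only [pvCnt, if_neg hnr]; omega
        simp only [pvQ, hrow, hc7, hc3, hcr, ih, hf]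
        exact pv_step7 (pvCnt pvP3 xs) (pvCnt pvP7 xs) (pvCnt pvPR xs)
      · by_cases h3 : pvP3 x
        · have hnr : ¬ pvPR x := fun h => h.2.2 h3.2.2
          have hrow : pvRow x xs = pvCnt pvP3 xs + pvCnt pvPR xs := by
            rw [pvRow_eq, if_neg h21, if_neg h7, if_pos h3]
          have hc3 : pvCnt pvP3 (x :: xs) = pvCnt pvP3 xs + 1 := by
            simp only [pvCnt, if_pos h3]; omega
          have hc7 : pvCnt pvP7 (x :: xs) = pvCnt pvP7 xs := by
            simp only [pvCnt, if_neg h7]; omega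
          have hcr : pvCnt pvPR (x :: xs) = pvCnt pvPR xs := by
            simp only [pvCnt, if_neg hnr]; omega
          simp only [pvQ, hrow, hc3, hc7, hcr, ih, hf]
          exact pv_step3 (pvCnt pvP3 xs) (pvCnt pvP7 xs) (pvCnt pvPR xs)
        · have hpr : pvPR x := by
            constructor
            · exact h21
            · constructor
              · intro hm7; exact h7 ⟨h21, hm7⟩
              · intro hm3
                by_cases hm7 : PySem.Int.mod x 7 = 0
                · exact h21 ⟨hm3, hm7⟩
                · exact h3 ⟨h21, hm7, hm3⟩
          have hrow : pvRow x xs = pvCnt pvP3 xs + pvCnt pvP7 xs := by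
            rw [pvRow_eq, if_neg h21, if_neg h7, if_neg h3]
          have hcr : pvCnt pvPR (x :: xs) = pvCnt pvPR xs + 1 := by
            simp only [pvCnt, if_pos hpr]; omega
          have hc3 : pvCnt pvP3 (x :: xs) = pvCnt pvP3 xs := by
            simp only [pvCnt, if_neg h3]; omega
          have hc7 : pvCnt pvP7 (x :: xs) = pvCnt pvP7 xs := by
            simp only [pvCnt, if_neg h7]; omega
          simp only [pvQ, hrow, hc3, hc7, hcr, ih, hf]
          exact pv_stepR (pvCnt pvP3 xs) (pvCnt pvP7 xs) (pvCnt pvPR xs)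

-- ===== VERDICT (by name: the statement is the Claim_ definition above) =====
theorem count_pairs_efficient_spec : Claim_equal_count_pairs_efficient := by
  intro numbers _
  unfold Spec_count_pairs_efficient count_pairs_efficient count_pairs_efficient_alt
  rw [foldA_eq, foldB_eq, pvQ_eq]
  simp [pvCross]
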